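-- pv_equiv track=rewrite | github.com/cesarnml/helsinki | IntroductionToProgramming/tms/hy-intro-to-programming-exam-17012026/Exam17012026-Exercise2/src/exercise2.py | find_allowed
-- ===== SOURCE A (Python) =====
-- def find_allowed(words: list[str], minimum: int):
--     target = "aeiouy"
--     matches: list[str] = []
--     for word in words:
--         count = 0
--         for char in target:
--             count += word.count(char)
--         if count >= minimum:
--             matches.append(word)
--     return matches
-- ===== SOURCE B (Python) =====
-- def find_allowed(words: list[str], minimum: int):
--     vowels = set("aeiouy")
--     return [word for word in words if sum(c in vowels for c in word) >= minimum]
-- ===== Notes on version B (the rewrite author's own statement) =====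
-- stated objective: simpler
-- what changed: Replaces the nested loop that makes six separate word.count(vowel) passes over each word with a single linear scan per word counting vowel-set membership, expressed as one list comprehension.
import Mathlib
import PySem

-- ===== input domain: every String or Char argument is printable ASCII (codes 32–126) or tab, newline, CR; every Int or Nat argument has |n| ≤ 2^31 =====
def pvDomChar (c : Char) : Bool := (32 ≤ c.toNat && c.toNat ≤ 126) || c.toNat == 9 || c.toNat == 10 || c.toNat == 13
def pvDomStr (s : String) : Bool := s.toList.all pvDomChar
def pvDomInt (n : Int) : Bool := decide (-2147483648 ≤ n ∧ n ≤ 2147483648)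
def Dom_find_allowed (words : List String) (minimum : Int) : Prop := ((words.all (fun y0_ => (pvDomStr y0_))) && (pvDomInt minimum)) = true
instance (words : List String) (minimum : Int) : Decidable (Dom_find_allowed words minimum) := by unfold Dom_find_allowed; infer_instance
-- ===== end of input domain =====

-- B replaces A's six separate word.count(vowel) passes per word with one
-- membership-counting scan per word (simpler, one list comprehension).

-- ===== PORT A =====
-- for word in words: count = 0; for char in "aeiouy": count += word.count(char); if count >= minimum: append
def find_allowed (words : List String) (minimum : Int) : List String :=
  let target := "aeiouy"
  words.foldl
    (fun acc0 word =>
      let count : Int :=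
        target.toList.foldl (fun acc ch => acc + (PySem.Str.count word (String.ofList [ch]) : Int)) 0
      if minimum ≤ count then acc0 ++ [word] else acc0)
    []

-- ===== PORT B =====
-- vowels = set("aeiouy"); [w for w in words if sum(c in vowels for c in w) >= minimum]
def find_allowed_alt (words : List String) (minimum : Int) : List String :=
  let vowels : PySem.Set Char := PySem.Set.ofList "aeiouy".toList
  words.filter (fun word =>
    minimum ≤ (word.toList.countP (fun c => vowels.contains c) : Int))

-- ===== PRECONDITION & SPEC =====
def Spec_find_allowed (words : List String) (minimum : Int) (out : List String) : Prop := out = find_allowed_alt words minimum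
instance (words : List String) (minimum : Int) (out : List String) : Decidable (Spec_find_allowed words minimum out) := by unfold Spec_find_allowed; infer_instance

-- ===== CLAIM (what is proved, stated in full; the proofs are below) =====
def Claim_equal_find_allowed : Prop := ∀ (words : List String) (minimum : Int), Dom_find_allowed words minimum → Spec_find_allowed words minimum (find_allowed words minimum)

-- ===== LEMMAS AND PROOFS =====

-- Python's str.count with a single-character needle is the character count.
theorem count_go_singleton (c : Char) (l : List Char) (fuel acc : Nat) (h : l.length ≤ fuel) :
    PySem.Chars.count.go [c] fuel l acc = acc + l.count c := by
  induction l generalizing fuel acc with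
  | nil => cases fuel <;> simp [PySem.Chars.count.go]
  | cons x t ih =>
    cases fuel with
    | zero => simp at h
    | succ n =>
      have hle : t.length ≤ n := by simpa using Nat.le_of_succ_le_succ h
      by_cases hx : c = x
      · subst hx
        simp [PySem.Chars.count.go, ih n (acc + 1) hle, List.count_cons]
        omega
      · simp [PySem.Chars.count.go, hx, Ne.symm hx, ih n acc hle, List.count_cons]

theorem strCount_singleton (w : String) (c : Char) :
    PySem.Str.count w (String.ofList [c]) = w.toList.count c := by
  rw [PySem.Str.count_eq]
  have h1 : (String.ofList [c]).toList = [c] := by simp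
  rw [h1]
  unfold PySem.Chars.count
  simp only [List.isEmpty_cons, Bool.false_eq_true, if_false]
  simpa using count_go_singleton c w.toList w.toList.length 0 le_rfl

-- per-word: the six counts sum to one membership count
theorem vowel_sum_eq (w : String) :
    ("aeiouy".toList.foldl (fun acc ch => acc + (PySem.Str.count w (String.ofList [ch]) : Int)) 0)
      = ((w.toList.countP (fun c => (PySem.Set.ofList "aeiouy".toList).contains c)) : Int) := by
  have htl : "aeiouy".toList = ['a','e','i','o','u','y'] := by decide
  rw [htl]
  simp only [List.foldl, strCount_singleton]
  have : ∀ l : List Char,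
      (l.count 'a' + l.count 'e' + l.count 'i' + l.count 'o' + l.count 'u' + l.count 'y' : Int)
        = (l.countP (fun c => (PySem.Set.ofList ['a','e','i','o','u','y']).contains c) : Int) := by
    intro l
    induction l with
    | nil => simp
    | cons x t ih =>
      simp only [List.count_cons, List.countP_cons]
      by_cases ha : x = 'a' <;> by_cases he : x = 'e' <;> by_cases hi : x = 'i' <;>
        by_cases ho : x = 'o' <;> by_cases hu : x = 'u' <;> by_cases hy : x = 'y' <;>
        simp_all <;> push_cast <;> omega
  show ((0 : Int) + _ + _ + _ + _ + _ + _) = _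
  rw [← this w.toList]; ring

theorem find_allowed_spec : Claim_equal_find_allowed := by
  intro words minimum _
  unfold Spec_find_allowed find_allowed find_allowed_alt
  simp only [vowel_sum_eq]
  have := PySem.List.foldl_append_if
    (fun w : String => decide (minimum ≤ ((w.toList.countP (fun c => (PySem.Set.ofList "aeiouy".toList).contains c)) : Int)))
    (fun w : String => w) words []
  simpa using this
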